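-- pv_equiv track=rewrite | github.com/rsliu-225/wrs | 0002_rs/bendplanner/bend_utils.py | pnp_cnt
-- ===== SOURCE A (Python) =====
-- def pnp_cnt(l):
--     def _intersec(lst1, lst2):
--         lst3 = [value for value in lst1 if value in lst2]
--         return lst3
--
--     cnt = 0
--     for i in range(len(l) - 1):
--         if l[i + 1] < l[i]:
--             cnt += 1
--         elif len(_intersec(l[:i], range(l[i], l[i + 1]))) > 0:
--             cnt += 1
--     return cnt
-- ===== SOURCE B (Python) =====
-- def pnp_cnt(l):
--     # Faster: maintain the prefix l[:i] as a sorted list; one binary search per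
--     # step replaces A's per-step slice + linear scan.
--     def _bisect_left(s, x):
--         lo, hi = 0, len(s)
--         while lo < hi:
--             mid = (lo + hi) // 2
--             if s[mid] < x:
--                 lo = mid + 1
--             else:
--                 hi = mid
--         return lo
--
--     cnt = 0
--     seen = []  # sorted copy of the prefix l[:i]
--     for i in range(len(l) - 1):
--         a, b = l[i], l[i + 1]
--         j = _bisect_left(seen, a)
--         if b < a:
--             cnt += 1
--         elif j < len(seen) and seen[j] < b:
--             cnt += 1
--         seen.insert(j, a)
--     return cnt
-- ===== Notes on version B (the rewrite author's own statement) =====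
-- stated objective: faster
-- what changed: Instead of slicing l[:i] and linearly scanning it for a value in [l[i], l[i+1]) at every step, B maintains the prefix as a sorted list and answers each step with one binary search (bisect_left, hand-rolled since A imports nothing) plus a sorted insertion.
import Mathlib
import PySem

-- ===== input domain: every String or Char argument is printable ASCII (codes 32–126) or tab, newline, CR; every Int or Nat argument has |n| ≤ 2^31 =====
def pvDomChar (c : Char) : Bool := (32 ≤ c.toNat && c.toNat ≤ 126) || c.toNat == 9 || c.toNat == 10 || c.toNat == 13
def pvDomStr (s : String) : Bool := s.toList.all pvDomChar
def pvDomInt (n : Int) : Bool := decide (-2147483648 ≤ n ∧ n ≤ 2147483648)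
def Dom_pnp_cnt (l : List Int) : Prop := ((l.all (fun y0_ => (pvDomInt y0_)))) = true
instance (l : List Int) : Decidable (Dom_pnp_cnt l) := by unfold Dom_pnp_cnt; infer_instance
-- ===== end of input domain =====

-- B replaces A's per-step slice l[:i] + linear scan by a sorted prefix list and one binary search per step (faster).

-- ===== PORT A =====
-- loop body of A; `value in range(l[i], l[i+1])` is ported arithmetically as l[i] ≤ value < l[i+1],
-- which is exactly Python's O(1) int-membership test on a step-1 range.
def stepA (l : List Int) (cnt : Int) (i : Int) : Int :=
  if PySem.List.pyGetD l (i + 1) 0 < PySem.List.pyGetD l i 0 then cnt + 1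
  else if 0 < ((PySem.List.slice l none (some i)).filter
      (fun v => decide (PySem.List.pyGetD l i 0 ≤ v ∧ v < PySem.List.pyGetD l (i + 1) 0))).length
    then cnt + 1 else cnt

def pnp_cnt (l : List Int) : Int :=
  (PySem.List.pyRange 0 ((l.length : Int) - 1) 1).foldl (stepA l) 0

-- ===== PORT B =====
-- loop body of B; state = (cnt, seen); the hand-rolled _bisect_left of Source B is the standard
-- bisect_left loop, ported as PySem.List.bisectLeft (the same algorithm).
def stepB (l : List Int) (st : Int × List Int) (i : Int) : Int × List Int :=
  let a := PySem.List.pyGetD l i 0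
  let b := PySem.List.pyGetD l (i + 1) 0
  let j := PySem.List.bisectLeft st.2 a
  ((if b < a then st.1 + 1
    else if j < st.2.length ∧ PySem.List.pyGetD st.2 (j : Int) 0 < b then st.1 + 1 else st.1),
   PySem.List.insert st.2 (j : Int) a)

def pnp_cnt_alt (l : List Int) : Int :=
  ((PySem.List.pyRange 0 ((l.length : Int) - 1) 1).foldl (stepB l) (0, [])).1

-- ===== PRECONDITION & SPEC =====
def Spec_pnp_cnt (l : List Int) (out : Int) : Prop := out = pnp_cnt_alt l
instance (l : List Int) (out : Int) : Decidable (Spec_pnp_cnt l out) := by unfold Spec_pnp_cnt; infer_instance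

-- ===== CLAIM (what is proved, stated in full; the proofs are below) =====
def Claim_equal_pnp_cnt : Prop := ∀ (l : List Int), Dom_pnp_cnt l → Spec_pnp_cnt l (pnp_cnt l)

-- ===== LEMMAS AND PROOFS =====

-- existence of a prefix value in [a, b) is exactly B's bisect test on the sorted prefix
lemma bisect_exists (s : List Int) (a b : Int) (hs : s.Pairwise (· ≤ ·)) :
    (PySem.List.bisectLeft s a < s.length ∧ s.getD (PySem.List.bisectLeft s a) 0 < b)
      ↔ ∃ v ∈ s, a ≤ v ∧ v < b := by
  obtain ⟨hle, hlt, hge⟩ := PySem.List.bisectLeft_spec s a hs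
  set j := PySem.List.bisectLeft s a with hj
  constructor
  · rintro ⟨hjl, hb⟩
    refine ⟨s[j], List.getElem_mem hjl, hge j hjl le_rfl, ?_⟩
    rwa [List.getD_eq_getElem s 0 hjl] at hb
  · rintro ⟨v, hv, hav, hvb⟩
    obtain ⟨k, hk, rfl⟩ := List.mem_iff_getElem.mp hv
    have hjk : j ≤ k := by
      by_contra h
      exact absurd (hlt k hk (by omega)) (not_lt.mpr hav)
    have hjl : j < s.length := lt_of_le_of_lt hjk hk
    refine ⟨hjl, ?_⟩
    rw [List.getD_eq_getElem s 0 hjl]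
    rcases eq_or_lt_of_le hjk with h | h
    · simpa [h]
    · exact lt_of_le_of_lt (List.pairwise_iff_getElem.mp hs j k hjl hk h) hvb

-- inserting a at its bisect_left position keeps the list sorted and is a permutation of a :: s
lemma insert_sorted_perm (s : List Int) (a : Int) (hs : s.Pairwise (· ≤ ·)) :
    (PySem.List.insert s ((PySem.List.bisectLeft s a : Nat) : Int) a).Pairwise (· ≤ ·) ∧
    (PySem.List.insert s ((PySem.List.bisectLeft s a : Nat) : Int) a).Perm (a :: s) := by
  obtain ⟨hle, hlt, hge⟩ := PySem.List.bisectLeft_spec s a hs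
  set j := PySem.List.bisectLeft s a with hj
  have hjtk : (List.take j s).length = j := by rw [List.length_take]; omega
  have hjdr : (List.drop j s).length = s.length - j := List.length_drop
  rw [PySem.List.insert_natCast s j a hle]
  refine ⟨?_, ?_⟩
  · rw [List.pairwise_append]
    refine ⟨hs.take, ?_, ?_⟩
    · rw [List.pairwise_cons]
      refine ⟨?_, hs.drop⟩
      intro v hv
      obtain ⟨k, hk, rfl⟩ := List.mem_iff_getElem.mp hv
      rw [hjdr] at hk
      rw [List.getElem_drop]
      exact hge _ (by omega) (by omega)
    · intro u hu v hv
      obtain ⟨k, hk, rfl⟩ := List.mem_iff_getElem.mp hu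
      rw [hjtk] at hk
      rw [List.getElem_take]
      have hu' : s[k]'(by omega) < a := hlt k (by omega) hk
      rcases List.mem_cons.mp hv with rfl | hv'
      · exact le_of_lt hu'
      · obtain ⟨k', hk', rfl⟩ := List.mem_iff_getElem.mp hv'
        rw [hjdr] at hk'
        rw [List.getElem_drop]
        exact le_of_lt (lt_of_lt_of_le hu' (hge _ (by omega) (by omega)))
  · calc (List.take j s ++ a :: List.drop j s).Perm (a :: (List.take j s ++ List.drop j s)) :=
          List.perm_middle
      _ = (a :: s) := by rw [List.take_append_drop]

-- 0 < len(filter) is existence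
lemma filter_pos_iff (xs : List Int) (a b : Int) :
    (0 < (xs.filter (fun v => decide (a ≤ v ∧ v < b))).length) ↔ ∃ v ∈ xs, a ≤ v ∧ v < b := by
  simp [List.length_pos_iff, List.filter_eq_nil_iff]

-- loop invariant: after m steps B's counter equals A's and B's seen is a sorted permutation of l[:m]
lemma loop_inv (l : List Int) (m : Nat) (hm : m + 1 ≤ l.length) :
    ((PySem.List.pyRange 0 (m : Int) 1).foldl (stepB l) (0, [])).1
        = (PySem.List.pyRange 0 (m : Int) 1).foldl (stepA l) 0
    ∧ ((PySem.List.pyRange 0 (m : Int) 1).foldl (stepB l) (0, [])).2.Pairwise (· ≤ ·)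
    ∧ ((PySem.List.pyRange 0 (m : Int) 1).foldl (stepB l) (0, [])).2.Perm (l.take m) := by
  induction m with
  | zero => simp [PySem.List.pyRange_one_eq_nil]
  | succ m ih =>
    obtain ⟨ihc, ihs, ihp⟩ := ih (Nat.le_of_succ_le hm)
    have hrange : PySem.List.pyRange 0 ((m + 1 : Nat) : Int) 1
        = PySem.List.pyRange 0 (m : Int) 1 ++ [(m : Int)] := by
      push_cast
      exact PySem.List.pyRange_one_succ_right (by positivity)
    rw [hrange, List.foldl_append, List.foldl_append]
    set st := (PySem.List.pyRange 0 (m : Int) 1).foldl (stepB l) (0, []) with hst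
    set c := (PySem.List.pyRange 0 (m : Int) 1).foldl (stepA l) 0 with hc
    have hmlt : m < l.length := by omega
    have hm1lt : m + 1 < l.length := by omega
    have ha : PySem.List.pyGetD l (m : Int) 0 = l.getD m 0 := PySem.List.pyGetD_natCast l m 0
    have hb : PySem.List.pyGetD l ((m : Int) + 1) 0 = l.getD (m + 1) 0 := by
      have h1 : ((m : Int) + 1) = ((m + 1 : Nat) : Int) := by push_cast; ring
      rw [h1, PySem.List.pyGetD_natCast]
    have hslice : PySem.List.slice l none (some (m : Int)) = l.take m :=
      PySem.List.slice_to_natCast l m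
    set a := l.getD m 0 with hadef
    set b := l.getD (m + 1) 0 with hbdef
    have hcond : (PySem.List.bisectLeft st.2 a < st.2.length ∧
        PySem.List.pyGetD st.2 ((PySem.List.bisectLeft st.2 a : Nat) : Int) 0 < b)
        ↔ 0 < ((l.take m).filter (fun v => decide (a ≤ v ∧ v < b))).length := by
      rw [PySem.List.pyGetD_natCast, bisect_exists st.2 a b ihs, filter_pos_iff]
      constructor
      · rintro ⟨v, hv, h⟩; exact ⟨v, ihp.mem_iff.mp hv, h⟩
      · rintro ⟨v, hv, h⟩; exact ⟨v, ihp.mem_iff.mpr hv, h⟩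
    obtain ⟨hins_sorted, hins_perm⟩ := insert_sorted_perm st.2 a ihs
    have htake : l.take (m + 1) = l.take m ++ [a] := by
      rw [List.take_add_one, List.getElem?_eq_getElem hmlt]
      simp [hadef, List.getD, List.getElem?_eq_getElem hmlt]
    refine ⟨?_, ?_, ?_⟩
    · show (stepB l st (m : Int)).1 = stepA l c (m : Int)
      simp only [stepA, stepB, ha, hb, hslice, ihc]
      by_cases h1 : b < a
      · rw [if_pos h1, if_pos h1]
      · rw [if_neg h1, if_neg h1]
        exact if_congr hcond rfl rfl
    · show (stepB l st (m : Int)).2.Pairwise (· ≤ ·)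
      simpa only [stepB, ha] using hins_sorted
    · show (stepB l st (m : Int)).2.Perm (l.take (m + 1))
      simp only [stepB, ha]
      rw [htake]
      exact hins_perm.trans ((ihp.cons a).trans (List.perm_append_singleton a (l.take m)).symm)

-- ===== VERDICT (by name: the statement is the Claim_ definition above) =====
theorem pnp_cnt_spec : Claim_equal_pnp_cnt := by
  intro l _
  unfold Spec_pnp_cnt pnp_cnt pnp_cnt_alt
  rcases Nat.eq_zero_or_pos l.length with h0 | hpos
  · rw [h0]
    simp [PySem.List.pyRange_one_eq_nil]
  · have hcast : ((l.length : Int) - 1) = ((l.length - 1 : Nat) : Int) := by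
      omega
    rw [hcast]
    exact (loop_inv l (l.length - 1) (by omega)).1.symm
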